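-- pv_equiv track=rewrite | github.com/jjvadillo/IABD-Programacion-de-Inteligencia-Artificial | ejercicio_1.py | dividir_lista_enteros
-- ===== SOURCE A (Python) =====
-- def dividir_lista_enteros(lista):
--     lista_enteros_positivos=[]
--     lista_enteros_negativos=[]
--     for a in lista:
--         if (a >= 0):
--             lista_enteros_positivos.append(a)
--         else:
--             lista_enteros_negativos.append(a)
--     lista_enteros_positivos.sort()
--     lista_enteros_negativos.sort()
--     return lista_enteros_positivos, lista_enteros_negativos
-- ===== SOURCE B (Python) =====
-- def dividir_lista_enteros(lista):
--     s = sorted(lista)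
--     idx = sum(x < 0 for x in s)
--     return s[idx:], s[:idx]
-- ===== Notes on version B (the rewrite author's own statement) =====
-- stated objective: simpler
-- what changed: B sorts the whole list once (without mutating the input) and splits the sorted result at the count of negatives, instead of A's partition into two lists followed by two separate sorts.
import Mathlib
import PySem

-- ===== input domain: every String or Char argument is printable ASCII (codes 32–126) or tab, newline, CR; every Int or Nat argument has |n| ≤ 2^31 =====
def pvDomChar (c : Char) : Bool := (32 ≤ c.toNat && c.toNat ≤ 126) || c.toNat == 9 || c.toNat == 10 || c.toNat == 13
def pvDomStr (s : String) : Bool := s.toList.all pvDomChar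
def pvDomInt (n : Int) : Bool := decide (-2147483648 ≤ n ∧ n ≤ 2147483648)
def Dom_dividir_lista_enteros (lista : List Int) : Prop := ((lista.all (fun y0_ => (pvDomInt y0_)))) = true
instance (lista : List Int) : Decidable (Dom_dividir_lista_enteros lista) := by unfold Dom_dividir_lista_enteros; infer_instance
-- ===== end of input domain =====

-- B sorts once and splits the sorted list at the count of negatives, instead of A's
-- partition-then-two-sorts; objective: simpler (neither mutates its argument's return-relevant state;
-- A mutates only its own local lists).

-- ===== PORT A =====
def dividir_lista_enteros (lista : List Int) : List Int × List Int :=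
  let st := lista.foldl
    (fun (st : List Int × List Int) a =>
      if a ≥ 0 then (st.1 ++ [a], st.2) else (st.1, st.2 ++ [a]))
    ([], [])
  (PySem.List.sorted st.1 (fun x => x), PySem.List.sorted st.2 (fun x => x))

-- ===== PORT B =====
def dividir_lista_enteros_alt (lista : List Int) : List Int × List Int :=
  let s := PySem.List.sorted lista (fun x => x)
  let idx : Int := (s.map (fun x => if x < 0 then (1 : Int) else 0)).sum
  (PySem.List.slice s (some idx) none, PySem.List.slice s none (some idx))

-- ===== PRECONDITION & SPEC =====
def Spec_dividir_lista_enteros (lista : List Int) (out : List Int × List Int) : Prop := out = dividir_lista_enteros_alt lista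
instance (lista : List Int) (out : List Int × List Int) : Decidable (Spec_dividir_lista_enteros lista out) := by unfold Spec_dividir_lista_enteros; infer_instance

-- ===== CLAIM (what is proved, stated in full; the proofs are below) =====
def Claim_equal_dividir_lista_enteros : Prop := ∀ (lista : List Int), Dom_dividir_lista_enteros lista → Spec_dividir_lista_enteros lista (dividir_lista_enteros lista)

-- ===== LEMMAS AND PROOFS =====

-- A's loop is a partition into (non-negatives, negatives), in order.
theorem pv_foldl_partition (l : List Int) (acc : List Int × List Int) :
    l.foldl
      (fun (st : List Int × List Int) a =>
        if a ≥ 0 then (st.1 ++ [a], st.2) else (st.1, st.2 ++ [a])) acc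
    = (acc.1 ++ l.filter (fun a => decide (0 ≤ a)),
       acc.2 ++ l.filter (fun a => decide (a < 0))) := by
  induction l generalizing acc with
  | nil => simp
  | cons a t ih =>
    by_cases h : 0 ≤ a
    · simp [List.foldl_cons, h, ih, List.filter_cons, not_lt.mpr h]
    · simp [List.foldl_cons, h, ih, List.filter_cons, lt_of_not_ge h]

-- On a (≤)-sorted list, the first countP(<0) elements are exactly the negatives
-- and the rest exactly the non-negatives.
theorem pv_sorted_split (s : List Int) (h : s.Pairwise (· ≤ ·)) :
    s.take (s.countP (fun x => decide (x < 0))) = s.filter (fun x => decide (x < 0)) ∧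
    s.drop (s.countP (fun x => decide (x < 0))) = s.filter (fun x => decide (0 ≤ x)) := by
  induction s with
  | nil => simp
  | cons a t ih =>
    rcases List.pairwise_cons.mp h with ⟨ha, ht⟩
    by_cases hneg : a < 0
    · have := ih ht
      simp [List.countP_cons, List.filter_cons, hneg, not_le.mpr hneg, this.1, this.2]
    · have hz : 0 ≤ a := not_lt.mp hneg
      have hall : ∀ b ∈ t, ¬ (b < 0) := fun b hb => not_lt.mpr (le_trans hz (ha b hb))
      have hcnt : t.countP (fun x => decide (x < 0)) = 0 := by
        rw [List.countP_eq_zero]; simpa using hall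
      have hfil : t.filter (fun x => decide (x < 0)) = [] := by
        rw [List.filter_eq_nil_iff]; simpa using hall
      have hfil2 : t.filter (fun x => decide (0 ≤ x)) = t := by
        rw [List.filter_eq_self]
        intro b hb; simpa using le_trans hz (ha b hb)
      simp [List.countP_cons, List.filter_cons, hneg, hz, hcnt, hfil, hfil2]

-- ===== VERDICT (by name: the statement is the Claim_ definition above) =====
theorem dividir_lista_enteros_spec : Claim_equal_dividir_lista_enteros := by
  intro lista _
  unfold Spec_dividir_lista_enteros dividir_lista_enteros dividir_lista_enteros_alt
  simp only [pv_foldl_partition, List.nil_append]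
  set s := PySem.List.sorted lista (fun x => x) with hs
  have hpair : s.Pairwise (· ≤ ·) := PySem.List.sorted_pairwise lista (fun x => x)
  have hsum : (s.map (fun x => if x < 0 then (1 : Int) else 0)).sum
      = ((s.countP (fun x => decide (x < 0)) : Nat) : Int) := by
    simpa using PySem.List.sum_map_ite_one_zero (fun x => decide (x < 0)) s
  rw [hsum, PySem.List.slice_from_natCast, PySem.List.slice_to_natCast]
  obtain ⟨htake, hdrop⟩ := pv_sorted_split s hpair
  have hperm : s.Perm lista := PySem.List.sorted_perm lista (fun x => x) false
  have h1 : (PySem.List.sorted (lista.filter (fun a => decide (0 ≤ a))) fun x => x)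
      = s.drop (s.countP (fun x => decide (x < 0))) := by
    apply PySem.List.sorted_id_eq_of_perm_of_pairwise
    · rw [hdrop]; exact hperm.filter _
    · exact List.Pairwise.sublist (List.drop_sublist _ _) hpair
  have h2 : (PySem.List.sorted (lista.filter (fun a => decide (a < 0))) fun x => x)
      = s.take (s.countP (fun x => decide (x < 0))) := by
    apply PySem.List.sorted_id_eq_of_perm_of_pairwise
    · rw [htake]; exact hperm.filter _
    · exact List.Pairwise.sublist (List.take_sublist _ _) hpair
  rw [h1, h2]
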